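-- pv_equiv track=rewrite | github.com/Hodgeli/vine_dataset | HashTag/count.py | subString1
-- ===== SOURCE A (Python) =====
-- def subString1(template):  # HashTag以‘#’开头，以空格或回车结尾
--     copy = False
--     finished = False
--     slotList = []
--     str = ""
--     for s in template:
--         if s == '#':
--             copy = True
--         elif s == ' ':
--             copy = False
--             finished = True
--         elif s == '\n':
--             copy = False
--             finished = True
--         elif copy:
--             str = str + s
--         if finished:
--             if str != "":
--                 slotList.append(str)
--             str = ""
--             finished = False
--     return slotList
-- ===== SOURCE B (Python) =====
-- def subString1(template):
--     out = []
--     for part in template.replace('\n', ' ').split(' ')[:-1]: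
--         tag = part.partition('#')[2].replace('#', '')
--         if tag:
--             out.append(tag)
--     return out
-- ===== Notes on version B (the rewrite author's own statement) =====
-- stated objective: simpler
-- what changed: Replaces A's char-by-char copy/finished state machine with a tokenize-then-extract pass (split the template on the delimiter characters, drop the unterminated last token, keep what follows each token's first hash sign with further hash signs removed); the per-character Python-level loop and string concatenation are replaced by C-level split/partition/replace, a constant-factor speedup.
import Mathlib
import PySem

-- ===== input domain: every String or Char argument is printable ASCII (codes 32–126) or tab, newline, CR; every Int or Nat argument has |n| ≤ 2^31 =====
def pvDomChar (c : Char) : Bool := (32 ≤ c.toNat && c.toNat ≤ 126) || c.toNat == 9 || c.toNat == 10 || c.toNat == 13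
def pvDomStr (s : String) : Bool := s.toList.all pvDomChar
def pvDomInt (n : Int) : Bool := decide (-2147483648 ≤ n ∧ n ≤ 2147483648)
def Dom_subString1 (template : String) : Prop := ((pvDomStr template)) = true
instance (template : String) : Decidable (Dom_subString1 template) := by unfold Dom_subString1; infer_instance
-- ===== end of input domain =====

-- B replaces A's char-by-char copy/finished state machine by tokenize-then-extract:
-- split on ' '/'\n', drop the unterminated last token, take what follows the first '#'
-- of each token with further '#' removed; objective: simpler (same O(n) cost).

-- ===== PORT A =====
-- literal state machine: copy flag, current str, slotList; the 'finished' flush is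
-- inlined into the two delimiter branches (finished is set and reset within one iteration)
def subString1.goA : List Char → Bool → List (List Char) → List Char → List (List Char)
  | [], _, slot, _ => slot
  | s :: rest, copy, slot, str =>
    if s = '#' then subString1.goA rest true slot str
    else if s = ' ' then subString1.goA rest false (if str ≠ [] then slot ++ [str] else slot) []
    else if s = '\n' then subString1.goA rest false (if str ≠ [] then slot ++ [str] else slot) []
    else if copy then subString1.goA rest copy slot (str ++ [s])
    else subString1.goA rest copy slot str

def subString1 (template : String) : List String :=
  (subString1.goA template.toList false [] []).map (fun l => String.ofList l)

-- ===== PORT B =====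
def subString1_alt (template : String) : List String :=
  -- template.replace('\n',' ').split(' ')
  let parts := PySem.Chars.splitOn (PySem.Chars.replace template.toList ['\n'] [' ']) [' ']
  -- for part in parts[:-1]: tag = part.partition('#')[2].replace('#',''); if tag: out.append(tag)
  ((parts.dropLast).foldl
    (fun out part =>
      let tag := PySem.Chars.replace ((part.dropWhile (· ≠ '#')).drop 1) ['#'] []
      if tag ≠ [] then out ++ [tag] else out) []).map (fun l => String.ofList l)

-- ===== PRECONDITION & SPEC =====
def Spec_subString1 (template : String) (out : List String) : Prop := out = subString1_alt template
instance (template : String) (out : List String) : Decidable (Spec_subString1 template out) := by unfold Spec_subString1; infer_instance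

-- ===== CLAIM (what is proved, stated in full; the proofs are below) =====
def Claim_equal_subString1 : Prop := ∀ (template : String), Dom_subString1 template → Spec_subString1 template (subString1 template)

-- ===== LEMMAS AND PROOFS =====

-- structural view of split on a single space
def pvSplitSp : List Char → List (List Char)
  | [] => [[]]
  | c :: cs => if c = ' ' then [] :: pvSplitSp cs
               else match pvSplitSp cs with
                    | [] => [[c]]
                    | h :: t => (c :: h) :: t

lemma pvSplitSp_ne_nil (l : List Char) : pvSplitSp l ≠ [] := by
  cases l with
  | nil => simp [pvSplitSp]
  | cons c cs =>
    simp only [pvSplitSp]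
    split
    · simp
    · split <;> simp

-- replace with a single-char pattern, characterized
lemma replace_go_single (a : Char) (new : List Char) :
    ∀ (l : List Char) (fuel : Nat) (acc : List Char), l.length ≤ fuel →
      PySem.Chars.replace.go [a] new fuel l acc
        = acc.reverse ++ l.flatMap (fun c => if c = a then new else [c]) := by
  intro l
  induction l with
  | nil =>
    intro fuel acc h
    cases fuel with
    | zero => simp [PySem.Chars.replace.go]
    | succ f => simp [PySem.Chars.replace.go]
  | cons c t ih =>
    intro fuel acc h
    cases fuel with
    | zero => simp at h
    | succ f =>
      simp only [PySem.Chars.replace.go, List.isPrefixOf, List.flatMap_cons]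
      by_cases hc : c = a
      · have hb : (a == c) = true := by simp [hc]
        simp only [hb, Bool.true_and, if_true, List.length_cons,
          List.drop_succ_cons, List.drop_zero, List.length_nil]
        rw [ih f (new.reverse ++ acc) (by simp at h; omega)]
        simp [hc]
      · have hb : (a == c) = false := beq_eq_false_iff_ne.2 (fun e => hc e.symm)
        simp only [hb, Bool.false_and, Bool.false_eq_true, if_false]
        rw [ih f (c :: acc) (by simp at h; omega)]
        simp [hc]

lemma replace_nl (l : List Char) :
    PySem.Chars.replace l ['\n'] [' '] = l.map (fun c => if c = '\n' then ' ' else c) := by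
  simp only [PySem.Chars.replace, List.isEmpty, Bool.false_eq_true, if_false]
  rw [replace_go_single '\n' [' '] l l.length [] (by omega)]
  simp only [List.reverse_nil, List.nil_append]
  induction l with
  | nil => simp
  | cons c t ih => by_cases hc : c = '\n' <;> simp [hc, ih]

lemma replace_hash (l : List Char) :
    PySem.Chars.replace l ['#'] [] = l.filter (· ≠ '#') := by
  simp only [PySem.Chars.replace, List.isEmpty, Bool.false_eq_true, if_false]
  rw [replace_go_single '#' [] l l.length [] (by omega)]
  simp only [List.reverse_nil, List.nil_append]
  induction l with
  | nil => simp
  | cons c t ih => by_cases hc : c = '#' <;> simp [hc, ih]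

-- splitOn with a single space, characterized by pvSplitSp
def pvConsHead (p : List Char) : List (List Char) → List (List Char)
  | [] => [p]
  | h :: t => (p ++ h) :: t

lemma splitOn_go_sp :
    ∀ (l : List Char) (fuel : Nat) (cur : List Char) (acc : List (List Char)), l.length < fuel →
      PySem.Chars.splitOn.go [' '] fuel l cur acc
        = acc.reverse ++ pvConsHead cur.reverse (pvSplitSp l) := by
  intro l
  induction l with
  | nil =>
    intro fuel cur acc h
    cases fuel with
    | zero => omega
    | succ f => simp [PySem.Chars.splitOn.go, pvSplitSp, pvConsHead]
  | cons c t ih =>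
    intro fuel cur acc h
    cases fuel with
    | zero => omega
    | succ f =>
      simp only [PySem.Chars.splitOn.go, List.isPrefixOf]
      by_cases hc : c = ' '
      · have hb : (' ' == c) = true := by simp [hc]
        simp only [hb, Bool.true_and, if_true, List.length_cons,
          List.drop_succ_cons, List.drop_zero, List.length_nil]
        rw [ih f [] (cur.reverse :: acc) (by simp at h; omega)]
        simp only [pvSplitSp, if_pos hc, List.reverse_cons, List.reverse_nil]
        cases hsp : pvSplitSp t with
        | nil => exact absurd hsp (pvSplitSp_ne_nil t)
        | cons h2 t2 => simp [pvConsHead]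
      · have hb : (' ' == c) = false := beq_eq_false_iff_ne.2 (fun e => hc e.symm)
        simp only [hb, Bool.false_and, Bool.false_eq_true, if_false]
        rw [ih f (c :: cur) acc (by simp at h; omega)]
        simp only [pvSplitSp, if_neg hc, List.reverse_cons]
        cases hsp : pvSplitSp t with
        | nil => exact absurd hsp (pvSplitSp_ne_nil t)
        | cons h2 t2 => simp [pvConsHead]

lemma splitOn_sp (l : List Char) :
    PySem.Chars.splitOn l [' '] = pvSplitSp l := by
  simp only [PySem.Chars.splitOn]
  rw [splitOn_go_sp l (l.length + 1) [] [] (by omega)]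
  cases hsp : pvSplitSp l with
  | nil => exact absurd hsp (pvSplitSp_ne_nil l)
  | cons h t => simp [pvConsHead]

-- extraction of one token, with the incoming state (copy, str) of A's machine
def pvStepTok (copy : Bool) (str t : List Char) : List Char :=
  str ++ (if copy then t.filter (· ≠ '#') else ((t.dropWhile (· ≠ '#')).drop 1).filter (· ≠ '#'))

-- token-level rendering of A's machine: flush the first token using the carried state,
-- process the rest fresh, drop the trailing unterminated token
def pvF : Bool → List Char → List (List Char) → List (List Char)
  | _, _, [] => []
  | _, _, [_] => []
  | copy, str, t :: t2 :: ts =>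
      (if pvStepTok copy str t = [] then [] else [pvStepTok copy str t]) ++ pvF false [] (t2 :: ts)

lemma pvF_hash (copy : Bool) (str h : List Char) (ts : List (List Char)) :
    pvF copy str (('#' :: h) :: ts) = pvF true str (h :: ts) := by
  cases ts with
  | nil => simp [pvF]
  | cons t2 ts' =>
    have hst : pvStepTok copy str ('#' :: h) = pvStepTok true str h := by
      cases copy <;> simp [pvStepTok]
    simp [pvF, hst]

lemma pvF_char (copy : Bool) (c : Char) (hc : c ≠ '#') (str h : List Char) (ts : List (List Char)) :
    pvF copy str ((c :: h) :: ts) = pvF copy (if copy then str ++ [c] else str) (h :: ts) := by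
  cases ts with
  | nil => cases copy <;> simp [pvF]
  | cons t2 ts' =>
    have hst : pvStepTok copy str (c :: h) = pvStepTok copy (if copy then str ++ [c] else str) h := by
      cases copy <;> simp [pvStepTok, hc]
    simp [pvF, hst]

-- main invariant: A's machine computes the token-level rendering
lemma goA_eq_pvF :
    ∀ (cs : List Char) (copy : Bool) (str : List Char) (slot : List (List Char)),
      subString1.goA cs copy slot str
        = slot ++ pvF copy str (pvSplitSp (cs.map (fun c => if c = '\n' then ' ' else c))) := by
  intro cs
  induction cs with
  | nil => intro copy str slot; simp [subString1.goA, pvSplitSp, pvF]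
  | cons c rest ih =>
    intro copy str slot
    by_cases h1 : c = '#'
    · subst h1
      simp only [subString1.goA, if_true, List.map_cons, if_neg (by decide : ¬('#' : Char) = '\n')]
      rw [ih]
      simp only [pvSplitSp, if_neg (by decide : ¬('#' : Char) = ' ')]
      cases hsp : pvSplitSp (rest.map (fun c => if c = '\n' then ' ' else c)) with
      | nil => exact absurd hsp (pvSplitSp_ne_nil _)
      | cons h t => rw [pvF_hash]
    · by_cases h2 : c = ' ' ∨ c = '\n'
      · have hmap : (if c = '\n' then ' ' else c) = ' ' := by
          rcases h2 with h2 | h2 <;> simp [h2]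
        have hstep : subString1.goA (c :: rest) copy slot str
            = subString1.goA rest false (if str ≠ [] then slot ++ [str] else slot) [] := by
          rcases h2 with h2 | h2 <;> subst h2 <;> simp [subString1.goA, h1]
        rw [hstep, ih]
        simp only [List.map_cons, hmap, pvSplitSp]
        cases hsp : pvSplitSp (rest.map (fun c => if c = '\n' then ' ' else c)) with
        | nil => exact absurd hsp (pvSplitSp_ne_nil _)
        | cons h t =>
          have h0 : ∀ s : List Char, pvStepTok copy s [] = s := by
            intro s; cases copy <;> simp [pvStepTok]
          by_cases hstr : str = [] <;> simp [pvF, h0, hstr]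
      · rw [not_or] at h2
        obtain ⟨hsp', hnl⟩ := h2
        have hstep : subString1.goA (c :: rest) copy slot str
            = subString1.goA rest copy slot (if copy then str ++ [c] else str) := by
          cases copy <;> simp [subString1.goA, h1, hsp', hnl]
        rw [hstep, ih]
        simp only [List.map_cons, if_neg hnl, pvSplitSp, if_neg hsp']
        cases hsp : pvSplitSp (rest.map (fun c => if c = '\n' then ' ' else c)) with
        | nil => exact absurd hsp (pvSplitSp_ne_nil _)
        | cons h t => rw [pvF_char copy c h1]

-- B's fold over the dropped-last token list equals the token-level rendering
lemma pvF_eq_foldl :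
    ∀ (ts : List (List Char)),
      pvF false [] ts
        = (ts.dropLast).foldl
            (fun out part =>
              let tag := PySem.Chars.replace ((part.dropWhile (· ≠ '#')).drop 1) ['#'] []
              if tag ≠ [] then out ++ [tag] else out) [] := by
  have gen : ∀ (ts : List (List Char)) (acc : List (List Char)),
      (ts.dropLast).foldl
          (fun out part =>
            let tag := PySem.Chars.replace ((part.dropWhile (· ≠ '#')).drop 1) ['#'] []
            if tag ≠ [] then out ++ [tag] else out) acc
        = acc ++ pvF false [] ts := by
    intro ts
    induction ts with
    | nil => intro acc; simp [pvF]
    | cons t ts' ih =>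
      intro acc
      cases ts' with
      | nil => simp [pvF]
      | cons t2 ts'' =>
        rw [List.dropLast_cons₂, List.foldl_cons, ih]
        simp only [pvF]
        generalize pvF false [] (t2 :: ts'') = X
        simp only [pvStepTok, replace_hash, Bool.false_eq_true, if_false, List.nil_append]
        split_ifs with h1 h2 <;>
          first
            | exact absurd h2 h1
            | exact absurd (not_not.1 h1) h2
            | simp [List.append_assoc]
  intro ts
  rw [gen ts []]
  simp

-- ===== VERDICT (by name: the statement is the Claim_ definition above) =====
theorem subString1_spec : Claim_equal_subString1 := by
  intro template _
  unfold Spec_subString1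
  simp only [subString1, subString1_alt]
  rw [goA_eq_pvF, replace_nl, splitOn_sp, pvF_eq_foldl]
  simp only [List.nil_append]
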